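-- pv_equiv track=rewrite | github.com/HemanthKumarPenubothu/codemind-python | Vowel_Consonant_Seqeuence.py | v_c_s
-- ===== SOURCE A (Python) =====
-- def v_c_s(i_s):
--     o_s = ""
--     l_c_t = ""
--     v=['a', 'e', 'i', 'o', 'u']
--     for c in i_s:
--         if c in v:
--             if l_c_t != 'v':
--                 o_s += 'V'
--                 l_c_t = 'v'
--         else:
--             if l_c_t != 'c':
--                 o_s += 'C'
--                 l_c_t = 'c'
--     return o_s
-- ===== SOURCE B (Python) =====
-- def v_c_s(i_s):
--     v = ('a', 'e', 'i', 'o', 'u')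
--     out = []
--     i, n = 0, len(i_s)
--     while i < n:
--         k = i_s[i] in v
--         out.append('V' if k else 'C')
--         while i < n and (i_s[i] in v) == k:
--             i += 1
--     return ''.join(out)
-- ===== Notes on version B (the rewrite author's own statement) =====
-- stated objective: alternative
-- what changed: Replaces A's per-character state machine with a last-category flag by an outer loop over maximal vowel/consonant runs that emits one marker per run and skips the whole run with an inner scan.
import Mathlib
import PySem

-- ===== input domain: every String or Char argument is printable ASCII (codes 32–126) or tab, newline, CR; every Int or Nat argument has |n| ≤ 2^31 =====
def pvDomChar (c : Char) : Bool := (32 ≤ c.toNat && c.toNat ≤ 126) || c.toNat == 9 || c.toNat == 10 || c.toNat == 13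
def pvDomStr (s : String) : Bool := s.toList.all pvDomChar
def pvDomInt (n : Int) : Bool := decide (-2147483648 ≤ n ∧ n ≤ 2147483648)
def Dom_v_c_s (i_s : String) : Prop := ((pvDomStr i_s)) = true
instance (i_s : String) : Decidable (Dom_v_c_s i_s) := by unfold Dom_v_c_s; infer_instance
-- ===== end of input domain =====

-- B replaces A's per-character state flag by an outer loop over maximal runs,
-- emitting one marker per run (objective: alternative; same cost).

-- ===== PORT A =====
-- the for-loop of A, state (o_s, l_c_t) carried as arguments
def vcsLoop : List Char → String → String → String
  | [], o_s, _ => o_s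
  | c :: cs, o_s, l_c_t =>
    if c ∈ ['a', 'e', 'i', 'o', 'u'] then
      if l_c_t ≠ "v" then vcsLoop cs (o_s ++ "V") "v" else vcsLoop cs o_s l_c_t
    else
      if l_c_t ≠ "c" then vcsLoop cs (o_s ++ "C") "c" else vcsLoop cs o_s l_c_t

def v_c_s (i_s : String) : String := vcsLoop i_s.toList "" ""

-- ===== PORT B =====
def bIsV (c : Char) : Bool := decide (c ∈ ['a', 'e', 'i', 'o', 'u'])

-- outer while-loop: emit one marker per run, inner dropWhile = the run-skipping inner loop
def bRuns : List Char → List Char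
  | [] => []
  | c :: cs =>
    (if bIsV c then 'V' else 'C') :: bRuns (cs.dropWhile (fun d => bIsV d == bIsV c))
termination_by cs => cs.length
decreasing_by
  exact Nat.lt_succ_of_le (List.length_dropWhile_le _ _)

def v_c_s_alt (i_s : String) : String := String.ofList (bRuns i_s.toList)

-- ===== PRECONDITION & SPEC =====
def Spec_v_c_s (i_s : String) (out : String) : Prop := out = v_c_s_alt i_s
instance (i_s : String) (out : String) : Decidable (Spec_v_c_s i_s out) := by unfold Spec_v_c_s; infer_instance

-- ===== CLAIM (what is proved, stated in full; the proofs are below) =====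
def Claim_equal_v_c_s : Prop := ∀ (i_s : String), Dom_v_c_s i_s → Spec_v_c_s i_s (v_c_s i_s)

-- ===== LEMMAS AND PROOFS =====

-- proof-side state machine over an Option Bool last-category
def vcsM : List Char → Option Bool → List Char
  | [], _ => []
  | c :: cs, l =>
    if some (bIsV c) = l then vcsM cs l
    else (if bIsV c then 'V' else 'C') :: vcsM cs (some (bIsV c))

def encL : Option Bool → String
  | none => ""
  | some true => "v"
  | some false => "c"

theorem bRuns_nil : bRuns [] = [] := by rw [bRuns.eq_def]

theorem bRuns_cons (c : Char) (cs : List Char) :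
    bRuns (c :: cs)
      = (if bIsV c then 'V' else 'C') :: bRuns (cs.dropWhile (fun d => bIsV d == bIsV c)) := by
  rw [bRuns.eq_def]

theorem vcsLoop_eq_M (cs : List Char) : ∀ (o : String) (l : Option Bool),
    (vcsLoop cs o (encL l)).toList = o.toList ++ vcsM cs l := by
  induction cs with
  | nil => intro o l; simp [vcsLoop, vcsM]
  | cons c cs ih =>
    intro o l
    by_cases hv : c ∈ ['a', 'e', 'i', 'o', 'u']
    · have hV := ih (o ++ "V") (some true)
      simp only [encL] at hV
      rcases l with _ | b
      · simp [vcsLoop, vcsM, hv, bIsV, encL, hV]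
      · cases b
        · simp [vcsLoop, vcsM, hv, bIsV, encL, hV]
        · have h0 := ih o (some true)
          simp only [encL] at h0
          simp [vcsLoop, vcsM, hv, bIsV, encL, h0]
    · have hC := ih (o ++ "C") (some false)
      simp only [encL] at hC
      rcases l with _ | b
      · simp [vcsLoop, vcsM, hv, bIsV, encL, hC]
      · cases b
        · have h0 := ih o (some false)
          simp only [encL] at h0
          simp [vcsLoop, vcsM, hv, bIsV, encL, h0]
        · simp [vcsLoop, vcsM, hv, bIsV, encL, hC]

theorem M_eq_bRuns_some (cs : List Char) : ∀ (k : Bool),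
    vcsM cs (some k) = bRuns (cs.dropWhile (fun d => bIsV d == k)) := by
  induction cs with
  | nil => intro k; simp [vcsM, bRuns_nil]
  | cons c cs ih =>
    intro k
    by_cases h : bIsV c = k
    · have hb : (bIsV c == k) = true := by simp [h]
      simp [vcsM, h, List.dropWhile]
      simpa [hb] using ih k
    · have hb : (bIsV c == k) = false := by simp [h]
      simp [vcsM, h, List.dropWhile, hb, bRuns_cons, ih (bIsV c)]

theorem M_eq_bRuns (cs : List Char) : vcsM cs none = bRuns cs := by
  cases cs with
  | nil => simp [vcsM, bRuns_nil]
  | cons c cs => simp [vcsM, bRuns_cons, M_eq_bRuns_some cs (bIsV c)]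

-- ===== VERDICT (by name: the statement is the Claim_ definition above) =====
theorem v_c_s_spec : Claim_equal_v_c_s := by
  intro i_s _
  show v_c_s i_s = v_c_s_alt i_s
  have h := vcsLoop_eq_M i_s.toList "" none
  simp only [encL] at h
  apply String.toList_inj.mp
  simp [v_c_s, v_c_s_alt, h, M_eq_bRuns]
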